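-- pv_equiv track=rewrite | github.com/ACTCollaboration/moby2 | python/analysis/tod_ana/tools.py | checksize
-- ===== SOURCE A (Python) =====
-- def checksize(n):
--     while not (n%16): n//=16
--     while not (n%13): n//=13
--     while not (n%11): n//=11
--     while not (n%9): n//=9
--     while not (n%7): n//=7
--     while not (n%5): n//=5
--     while not (n%3): n//=3
--     while not (n%2): n//=2
--     return (1 if n == 1 else 0)
-- ===== SOURCE B (Python) =====
-- def checksize(n):
--     # Peel all 13-smooth content by repeated gcd with the primorial 2*3*5*7*11*13.
--     K = 30030
--
--     def _gcd(a, b):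
--         a, b = abs(a), abs(b)
--         while b:
--             a, b = b, a % b
--         return a
--
--     while True:
--         g = _gcd(n, K)
--         if g == 1:
--             break
--         n //= g
--     return 1 if n == 1 else 0
-- ===== Notes on version B (the rewrite author's own statement) =====
-- stated objective: alternative
-- what changed: Replaces A's eight fixed trial-division loops by a single loop that repeatedly divides n by g = gcd(n, K), K the primorial 30030, until g == 1; the smooth part of n is removed in a few gcd rounds instead of one loop per scheduled divisor.
import Mathlib
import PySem

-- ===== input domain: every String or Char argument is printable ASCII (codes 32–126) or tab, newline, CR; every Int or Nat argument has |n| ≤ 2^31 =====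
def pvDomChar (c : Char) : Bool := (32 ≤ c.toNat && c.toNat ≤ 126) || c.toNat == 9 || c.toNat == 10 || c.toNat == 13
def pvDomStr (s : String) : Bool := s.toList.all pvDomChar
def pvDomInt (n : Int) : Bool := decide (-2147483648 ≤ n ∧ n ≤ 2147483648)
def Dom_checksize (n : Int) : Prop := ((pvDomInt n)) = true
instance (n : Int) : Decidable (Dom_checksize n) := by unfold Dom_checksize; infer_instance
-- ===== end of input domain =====

-- B replaces A's fixed schedule of trial-division loops with repeated division of n by
-- gcd(n, 30030) (30030 = the primorial of the small primes) — an alternative algorithm of similar cost.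

-- termination lemma for both ports' loops (exact division by a factor ≥ 2 shrinks |n|)
theorem pv_natAbs_fdiv_lt (n p : Int) (hp : 2 ≤ p) (hn : n ≠ 0) (hd : p ∣ n) :
    (PySem.Int.floordiv n p).natAbs < n.natAbs := by
  rw [PySem.Int.floordiv_eq_ediv_of_pos (by omega)]
  obtain ⟨k, rfl⟩ := hd
  rw [Int.mul_ediv_cancel_left _ (by omega : p ≠ 0)]
  have hk : k ≠ 0 := by rintro rfl; simp at hn
  have h1 : (p * k).natAbs = p.natAbs * k.natAbs := Int.natAbs_mul p k
  have h2 : 2 ≤ p.natAbs := by omega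
  have h3 : 1 ≤ k.natAbs := by
    have := Int.natAbs_eq_zero (a := k); omega
  calc k.natAbs < 2 * k.natAbs := by omega
    _ ≤ p.natAbs * k.natAbs := Nat.mul_le_mul_right _ h2
    _ = (p * k).natAbs := h1.symm

-- ===== PORT A =====
-- one 'while not (n % p): n //= p' loop of A (guard '2 ≤ p ∧ n ≠ 0' only makes it total;
-- every call site has p ≥ 2, and at n = 0 the Python loop does not terminate, excluded by Pre_)
def stripA (p n : Int) : Int :=
  if h : 2 ≤ p ∧ n ≠ 0 ∧ PySem.Int.mod n p = 0 then
    stripA p (PySem.Int.floordiv n p)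
  else n
termination_by n.natAbs
decreasing_by
  exact pv_natAbs_fdiv_lt n p h.1 h.2.1 ((PySem.Int.mod_eq_zero_iff_dvd n p).mp h.2.2)

def checksize (n : Int) : Int :=
  let n := stripA 16 n
  let n := stripA 13 n
  let n := stripA 11 n
  let n := stripA 9 n
  let n := stripA 7 n
  let n := stripA 5 n
  let n := stripA 3 n
  let n := stripA 2 n
  if n = 1 then 1 else 0

-- ===== PORT B =====
-- Source B's Euclid loop 'while b: a, b = b, a % b' (guard '0 < b' makes it total; callers pass b ≥ 0)
def gcdLoop (a b : Int) : Int :=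
  if h : 0 < b then gcdLoop b (PySem.Int.mod a b) else a
termination_by b.natAbs
decreasing_by
  rw [PySem.Int.mod_eq_emod_of_pos h]
  have h1 := Int.emod_nonneg a (by omega : b ≠ 0)
  have h2 := Int.emod_lt_of_pos a h
  omega

-- Source B's _gcd(a, b) = Euclid on (|a|, |b|)
def pyGcd (a b : Int) : Int := gcdLoop |a| |b|

-- value of the Euclid loop (needed by altLoop's termination proof)
theorem gcdLoop_eq (a b : Int) (ha : 0 ≤ a) (hb : 0 ≤ b) : gcdLoop a b = Int.gcd a b := by
  induction hN : b.natAbs using Nat.strong_induction_on generalizing a b with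
  | _ N ih =>
    rw [gcdLoop]
    split
    · next hpos =>
      rw [PySem.Int.mod_eq_emod_of_pos hpos]
      have h1 := Int.emod_nonneg a (by omega : b ≠ 0)
      have h2 := Int.emod_lt_of_pos a hpos
      rw [ih (a % b).natAbs (by omega) b (a % b) hb h1 rfl]
      obtain ⟨m, rfl⟩ := Int.eq_ofNat_of_zero_le ha
      obtain ⟨k, rfl⟩ := Int.eq_ofNat_of_zero_le hb
      have hmod : ((m : Int) % (k : Int)) = ((m % k : Nat) : Int) := (Int.natCast_mod m k).symm
      rw [hmod]
      simp only [Int.gcd_natCast_natCast]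
      rw [Nat.gcd_comm k (m % k), ← Nat.gcd_rec k m, Nat.gcd_comm k m]
    · next hpos =>
      have : b = 0 := by omega
      subst this
      simp [Int.gcd]
      exact (abs_of_nonneg ha).symm

theorem pyGcd_eq (a b : Int) : pyGcd a b = Int.gcd a b := by
  unfold pyGcd
  rw [gcdLoop_eq _ _ (abs_nonneg a) (abs_nonneg b)]
  simp [Int.gcd, Int.natAbs_abs]

-- Source B's main loop: divide n by gcd(n, 30030) until it is 1
-- (guard 'n ≠ 0' only makes it total: at n = 0 gcd = 30030 and 0 // 30030 = 0, excluded by Pre_)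
def altLoop (n : Int) : Int :=
  let g := pyGcd n 30030
  if h : ¬ g = 1 ∧ n ≠ 0 then altLoop (PySem.Int.floordiv n g) else n
termination_by n.natAbs
decreasing_by
  have hg : pyGcd n 30030 = Int.gcd n 30030 := pyGcd_eq n 30030
  have hdvd : (Int.gcd n 30030 : Int) ∣ n := Int.gcd_dvd_left n 30030
  have hne : Int.gcd n 30030 ≠ 0 := by
    simp [Int.gcd_eq_zero_iff]
  have h2 : 2 ≤ (Int.gcd n 30030 : Int) := by
    have h1 : Int.gcd n 30030 ≠ 1 := by
      intro hc
      apply h.1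
      show pyGcd n 30030 = 1
      rw [hg, hc]; rfl
    omega
  rw [hg]
  exact pv_natAbs_fdiv_lt n _ h2 h.2 hdvd

def checksize_alt (n : Int) : Int :=
  if altLoop n = 1 then 1 else 0

-- ===== PRECONDITION & SPEC =====
-- Pre_ excludes n = 0, on which A's first loop (and B's loop) never terminates.
def Pre_checksize (n : Int) : Prop := n ≠ 0
instance (n : Int) : Decidable (Pre_checksize n) := by unfold Pre_checksize; infer_instance
def pvWitness_checksize : Int := 6

def Spec_checksize (n : Int) (out : Int) : Prop := out = checksize_alt n
instance (n : Int) (out : Int) : Decidable (Spec_checksize n out) := by unfold Spec_checksize; infer_instance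

-- ===== CLAIM (what is proved, stated in full; the proofs are below) =====
def Claim_equal_checksize : Prop := ∀ (n : Int), Dom_checksize n → Pre_checksize n → Spec_checksize n (checksize n)

-- ===== LEMMAS AND PROOFS =====

-- every prime factor divides 30030 = 2*3*5*7*11*13
def SmoothNat (a : ℕ) : Prop := ∀ p : ℕ, p.Prime → p ∣ a → p ∣ 30030

theorem smooth_one : SmoothNat 1 := by
  intro p hp hd
  exact absurd (Nat.eq_one_of_dvd_one hd) hp.ne_one

theorem smooth_mul {a b : ℕ} (ha : SmoothNat a) (hb : SmoothNat b) : SmoothNat (a * b) := by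
  intro p hp hd
  rcases (Nat.Prime.dvd_mul hp).mp hd with h | h
  · exact ha p hp h
  · exact hb p hp h

-- uniqueness of the 13-smooth-free part (sign included)
theorem sfree_unique (n r1 r2 : Int) (hn : n ≠ 0)
    (c1 : Nat.Coprime r1.natAbs 30030) (c2 : Nat.Coprime r2.natAbs 30030)
    (e1 : ∃ a : ℕ, 0 < a ∧ SmoothNat a ∧ n = r1 * a)
    (e2 : ∃ a : ℕ, 0 < a ∧ SmoothNat a ∧ n = r2 * a) : r1 = r2 := by
  obtain ⟨a1, ha1, hs1, hE1⟩ := e1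
  obtain ⟨a2, ha2, hs2, hE2⟩ := e2
  have key : ∀ (r r' : Int) (a a' : ℕ), Nat.Coprime r.natAbs 30030 → SmoothNat a' →
      r * a = r' * a' → r ∣ r' := by
    intro r r' a a' hc hs' hEq
    have hcop : Nat.Coprime r.natAbs a' := by
      by_contra h
      obtain ⟨p, hp, hpr, hpa⟩ := Nat.Prime.not_coprime_iff_dvd.mp h
      have h30 : p ∣ 30030 := hs' p hp hpa
      have : p ∣ Nat.gcd r.natAbs 30030 := Nat.dvd_gcd hpr h30
      rw [hc] at this
      exact hp.ne_one (Nat.eq_one_of_dvd_one this)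
    have hdvd : r ∣ r' * (a' : Int) := ⟨a, hEq.symm ▸ rfl⟩
    have hg : Int.gcd r (a' : Int) = 1 := by
      simpa [Int.gcd] using hcop
    have := Int.dvd_of_dvd_mul_right_of_gcd_one (a := r) (b := (a' : Int)) (c := r')
      (by rwa [mul_comm] at hdvd) hg
    exact this
  have d12 : r1 ∣ r2 := key r1 r2 a1 a2 c1 hs2 (hE1 ▸ hE2)
  have d21 : r2 ∣ r1 := key r2 r1 a2 a1 c2 hs1 (hE2 ▸ hE1)
  have habs : r1.natAbs = r2.natAbs :=
    Nat.dvd_antisymm (Int.natAbs_dvd_natAbs.mpr d12) (Int.natAbs_dvd_natAbs.mpr d21)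
  have hcases : r1 = r2 ∨ r1 = -r2 := by
    rcases Int.natAbs_eq r1 with h1 | h1 <;> rcases Int.natAbs_eq r2 with h2 | h2 <;>
      rw [habs] at h1 <;> omega
  rcases hcases with h | h
  · exact h
  · exfalso
    have : r2 * ((a1 : Int) + a2) = 0 := by
      have := hE1 ▸ hE2
      rw [h] at this
      ring_nf
      ring_nf at this
      linarith
    have hr2 : r2 ≠ 0 := by
      intro hc; rw [hc] at hE2; simp at hE2; exact hn hE2
    have : ((a1 : Int) + a2) = 0 := by
      rcases mul_eq_zero.mp this with h' | h'
      · exact absurd h' hr2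
      · exact h'
    omega

-- specification of one strip loop of A
theorem stripA_spec (N : ℕ) (p n : Int) (hN : n.natAbs ≤ N) (hp : 2 ≤ p) (hn : n ≠ 0) :
    stripA p n ≠ 0 ∧ ¬ (p ∣ stripA p n) ∧
    ∃ a : ℕ, 0 < a ∧ (∀ q : ℕ, q.Prime → q ∣ a → q ∣ p.natAbs) ∧ n = stripA p n * a := by
  induction N generalizing n with
  | zero => omega
  | succ N ih =>
    rw [stripA]
    split
    · next h =>
      have hdvd : p ∣ n := (PySem.Int.mod_eq_zero_iff_dvd n p).mp h.2.2
      have hlt := pv_natAbs_fdiv_lt n p hp hn hdvd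
      set m := PySem.Int.floordiv n p with hm
      have hmv : m = n / p := by rw [hm, PySem.Int.floordiv_eq_ediv_of_pos (by omega)]
      have hnm : n = m * p := by
        rw [hmv]; exact (Int.ediv_mul_cancel hdvd).symm
      have hm0 : m ≠ 0 := by
        intro hc; rw [hc] at hnm; simp at hnm; exact hn hnm
      obtain ⟨hr0, hrnd, a, ha, hsm, hEq⟩ := ih m (by omega) hm0
      refine ⟨hr0, hrnd, a * p.natAbs, ?_, ?_, ?_⟩
      · have : 0 < p.natAbs := by omega
        positivity
      · intro q hq hd
        rcases (Nat.Prime.dvd_mul hq).mp hd with h' | h'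
        · exact hsm q hq h'
        · exact h'
      · have hpabs : (p.natAbs : Int) = p := Int.natAbs_of_nonneg (by omega)
        rw [Nat.cast_mul, hpabs]
        have hstep : n = (stripA p m * (a : Int)) * p := by
          rw [hnm]; exact congrArg (fun x => x * p) hEq
        rw [hstep]; ring
    · next h =>
      have hmod : PySem.Int.mod n p ≠ 0 := by
        intro hc; exact h ⟨hp, hn, hc⟩
      refine ⟨hn, ?_, 1, one_pos, ?_, by simp⟩
      · intro hd
        exact hmod ((PySem.Int.mod_eq_zero_iff_dvd n p).mpr hd)
      · intro q hq hd
        exact absurd (Nat.eq_one_of_dvd_one hd) hq.ne_one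

-- any prime dividing 30030 is one of 2,3,5,7,11,13
theorem prime_dvd_30030 (q : ℕ) (hq : q.Prime) (hd : q ∣ 30030) :
    q = 2 ∨ q = 3 ∨ q = 5 ∨ q = 7 ∨ q = 11 ∨ q = 13 := by
  have h : (30030 : ℕ) = 2 * (3 * (5 * (7 * (11 * 13)))) := by norm_num
  rw [h] at hd
  rcases (hq.dvd_mul).mp hd with h1 | h1
  · exact Or.inl ((Nat.prime_dvd_prime_iff_eq hq (by norm_num)).mp h1)
  rcases (hq.dvd_mul).mp h1 with h2 | h2
  · exact Or.inr (Or.inl ((Nat.prime_dvd_prime_iff_eq hq (by norm_num)).mp h2))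
  rcases (hq.dvd_mul).mp h2 with h3 | h3
  · exact Or.inr (Or.inr (Or.inl ((Nat.prime_dvd_prime_iff_eq hq (by norm_num)).mp h3)))
  rcases (hq.dvd_mul).mp h3 with h4 | h4
  · exact Or.inr (Or.inr (Or.inr (Or.inl ((Nat.prime_dvd_prime_iff_eq hq (by norm_num)).mp h4))))
  rcases (hq.dvd_mul).mp h4 with h5 | h5
  · exact Or.inr (Or.inr (Or.inr (Or.inr (Or.inl ((Nat.prime_dvd_prime_iff_eq hq (by norm_num)).mp h5)))))
  · exact Or.inr (Or.inr (Or.inr (Or.inr (Or.inr ((Nat.prime_dvd_prime_iff_eq hq (by norm_num)).mp h5)))))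

theorem smoothP (P : ℕ) (hP : 0 < P) (hd : ∀ q < P + 1, Nat.Prime q → q ∣ P → q ∣ 30030) :
    SmoothNat P :=
  fun q hq hqd => hd q (Nat.lt_succ_of_le (Nat.le_of_dvd hP hqd)) hq hqd

-- the chain of strips in A produces the 13-smooth-free part of n
theorem chainA_spec (n : Int) (hn : n ≠ 0) :
    let r := stripA 2 (stripA 3 (stripA 5 (stripA 7 (stripA 9 (stripA 11 (stripA 13 (stripA 16 n)))))))
    r ≠ 0 ∧ Nat.Coprime r.natAbs 30030 ∧ ∃ a : ℕ, 0 < a ∧ SmoothNat a ∧ n = r * a := by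
  intro r
  -- step through the eight strips
  have spec : ∀ (p m : Int), 2 ≤ p → SmoothNat p.natAbs → m ≠ 0 →
      stripA p m ≠ 0 ∧ ¬ (p ∣ stripA p m) ∧
      ∃ a : ℕ, 0 < a ∧ SmoothNat a ∧ m = stripA p m * a := by
    intro p m hp hps hm
    obtain ⟨h0, hnd, a, ha, hsm, hEq⟩ := stripA_spec m.natAbs p m le_rfl hp hm
    exact ⟨h0, hnd, a, ha, fun q hq hd => hps q hq (hsm q hq hd), hEq⟩
  obtain ⟨h16, _, a16, ha16, hs16, hE16⟩ := spec 16 n (by norm_num) (smoothP _ (by norm_num) (by decide)) hn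
  obtain ⟨h13, hnd13, a13, ha13, hs13, hE13⟩ := spec 13 _ (by norm_num) (smoothP _ (by norm_num) (by decide)) h16
  obtain ⟨h11, hnd11, a11, ha11, hs11, hE11⟩ := spec 11 _ (by norm_num) (smoothP _ (by norm_num) (by decide)) h13
  obtain ⟨h9, _, a9, ha9, hs9, hE9⟩ := spec 9 _ (by norm_num) (smoothP _ (by norm_num) (by decide)) h11
  obtain ⟨h7, hnd7, a7, ha7, hs7, hE7⟩ := spec 7 _ (by norm_num) (smoothP _ (by norm_num) (by decide)) h9
  obtain ⟨h5, hnd5, a5, ha5, hs5, hE5⟩ := spec 5 _ (by norm_num) (smoothP _ (by norm_num) (by decide)) h7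
  obtain ⟨h3, hnd3, a3, ha3, hs3, hE3⟩ := spec 3 _ (by norm_num) (smoothP _ (by norm_num) (by decide)) h5
  obtain ⟨h2, hnd2, a2, ha2, hs2, hE2⟩ := spec 2 _ (by norm_num) (smoothP _ (by norm_num) (by decide)) h3
  refine ⟨h2, ?_, ?_⟩
  · -- r divides each intermediate value, so no small prime divides r
    have dr3 : r ∣ stripA 3 (stripA 5 (stripA 7 (stripA 9 (stripA 11 (stripA 13 (stripA 16 n)))))) :=
      ⟨a2, hE2⟩
    have dr5 : r ∣ stripA 5 (stripA 7 (stripA 9 (stripA 11 (stripA 13 (stripA 16 n))))) :=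
      dvd_trans dr3 ⟨a3, hE3⟩
    have dr7 : r ∣ stripA 7 (stripA 9 (stripA 11 (stripA 13 (stripA 16 n)))) :=
      dvd_trans dr5 ⟨a5, hE5⟩
    have dr11 : r ∣ stripA 11 (stripA 13 (stripA 16 n)) :=
      dvd_trans dr7 (dvd_trans ⟨a7, hE7⟩ ⟨a9, hE9⟩)
    have dr13 : r ∣ stripA 13 (stripA 16 n) :=
      dvd_trans dr11 ⟨a11, hE11⟩
    have no2 : ¬ ((2 : Int) ∣ r) := hnd2
    have no3 : ¬ ((3 : Int) ∣ r) := fun h => hnd3 (dvd_trans h dr3)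
    have no5 : ¬ ((5 : Int) ∣ r) := fun h => hnd5 (dvd_trans h dr5)
    have no7 : ¬ ((7 : Int) ∣ r) := fun h => hnd7 (dvd_trans h dr7)
    have no11 : ¬ ((11 : Int) ∣ r) := fun h => hnd11 (dvd_trans h dr11)
    have no13 : ¬ ((13 : Int) ∣ r) := fun h => hnd13 (dvd_trans h dr13)
    by_contra h
    obtain ⟨q, hq, hqr, hq30⟩ := Nat.Prime.not_coprime_iff_dvd.mp h
    have hqi : (q : Int) ∣ r := Int.dvd_natAbs.mp (Int.natCast_dvd_natCast.mpr hqr)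
    rcases prime_dvd_30030 q hq hq30 with h' | h' | h' | h' | h' | h' <;> subst h'
    · exact no2 (by exact_mod_cast hqi)
    · exact no3 (by exact_mod_cast hqi)
    · exact no5 (by exact_mod_cast hqi)
    · exact no7 (by exact_mod_cast hqi)
    · exact no11 (by exact_mod_cast hqi)
    · exact no13 (by exact_mod_cast hqi)
  · refine ⟨a2 * a3 * a5 * a7 * a9 * a11 * a13 * a16, by positivity, ?_, ?_⟩
    · exact smooth_mul (smooth_mul (smooth_mul (smooth_mul (smooth_mul (smooth_mul
        (smooth_mul hs2 hs3) hs5) hs7) hs9) hs11) hs13) hs16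
    · push_cast
      rw [hE16, hE13, hE11, hE9, hE7, hE5, hE3, hE2]
      ring

-- specification of B's loop
theorem altLoop_spec (N : ℕ) (n : Int) (hN : n.natAbs ≤ N) (hn : n ≠ 0) :
    altLoop n ≠ 0 ∧ Nat.Coprime (altLoop n).natAbs 30030 ∧
    ∃ a : ℕ, 0 < a ∧ SmoothNat a ∧ n = altLoop n * a := by
  induction N generalizing n with
  | zero => omega
  | succ N ih =>
    rw [altLoop]
    simp only [pyGcd_eq]
    split
    · next h =>
      have hdvd : (Int.gcd n 30030 : Int) ∣ n := Int.gcd_dvd_left n 30030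
      have hne : Int.gcd n 30030 ≠ 0 := by simp [Int.gcd_eq_zero_iff]
      have h2 : 2 ≤ (Int.gcd n 30030 : Int) := by
        have h1 : Int.gcd n 30030 ≠ 1 := fun hc => h.1 (by rw [hc]; rfl)
        omega
      have hlt := pv_natAbs_fdiv_lt n _ h2 hn hdvd
      set g : Int := (Int.gcd n 30030 : Int) with hg
      set m := PySem.Int.floordiv n g with hm
      have hmv : m = n / g := by rw [hm, PySem.Int.floordiv_eq_ediv_of_pos (by omega)]
      have hnm : n = m * g := by rw [hmv]; exact (Int.ediv_mul_cancel hdvd).symm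
      have hm0 : m ≠ 0 := by intro hc; rw [hc] at hnm; simp at hnm; exact hn hnm
      obtain ⟨h0, hcop, a, ha, hsm, hEq⟩ := ih m (by omega) hm0
      refine ⟨h0, hcop, a * Int.gcd n 30030, by positivity, ?_, ?_⟩
      · refine smooth_mul hsm ?_
        intro q hq hd
        have : Int.gcd n 30030 ∣ (30030 : Nat) := by
          simpa [Int.gcd] using Nat.gcd_dvd_right n.natAbs 30030
        exact dvd_trans hd this
      · have hcast : ((a * Int.gcd n 30030 : ℕ) : Int) = (a : Int) * g := by
          rw [Nat.cast_mul, hg]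
        rw [hcast]
        calc n = m * g := hnm
          _ = (altLoop m * (a : Int)) * g := congrArg (fun x => x * g) hEq
          _ = altLoop m * ((a : Int) * g) := by ring
    · next h =>
      rcases not_and_or.mp h with h1 | h1
      · push_neg at h1
        refine ⟨hn, ?_, 1, one_pos, smooth_one, by simp⟩
        have : Int.gcd n 30030 = 1 := by exact_mod_cast h1
        exact this
      · exact absurd hn (by simpa using h1)

-- ===== VERDICT (by name: the statement is the Claim_ definition above) =====
theorem checksize_spec : Claim_equal_checksize := by
  intro n _ hpre
  unfold Spec_checksize checksize checksize_alt
  obtain ⟨hA0, hAcop, eA⟩ := chainA_spec n hpre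
  obtain ⟨hB0, hBcop, eB⟩ := altLoop_spec n.natAbs n le_rfl hpre
  have := sfree_unique n _ _ hpre hAcop hBcop eA eB
  simp only [this]
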